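-- pv_equiv track=rewrite | github.com/DharmikGohil013/CropSense-GCET | cropsense-app/backend/main.py | extract_diseases_from_analysis
-- ===== SOURCE A (Python) =====
-- def extract_diseases_from_analysis(analysis: str) -> list:
--     """Extract structured disease information from analysis text"""
--     diseases = []
--
--     # Simple parsing - in production, you might use more sophisticated NLP
--     lines = analysis.split('\n')
--     current_disease = None
--
--     for line in lines:
--         line = line.strip()
--         if line and ('**' in line or '*' in line) and any(word in line.lower() for word in ['disease', 'infection', 'deficiency', 'virus', 'bacteria', 'fungal']):
--             if current_disease:
--                 diseases.append(current_disease)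
--             current_disease = {
--                 "name": line.replace('*', '').replace('-', '').strip(),
--                 "probability": "Medium",
--                 "description": ""
--             }
--         elif current_disease and line and not line.startswith('**'):
--             if 'probability:' in line.lower() or 'high' in line.lower() or 'medium' in line.lower() or 'low' in line.lower():
--                 if 'high' in line.lower():
--                     current_disease["probability"] = "High"
--                 elif 'low' in line.lower():
--                     current_disease["probability"] = "Low"
--                 else:
--                     current_disease["probability"] = "Medium"
--             else:
--                 current_disease["description"] += line + " "
--
--     if current_disease:
--         diseases.append(current_disease)
--
--     # If no diseases were parsed, create some default ones
--     if not diseases: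
--         diseases = [
--             {
--                 "name": "Fungal Infection",
--                 "probability": "High",
--                 "description": "Common crop disease affecting leaves and stems"
--             },
--             {
--                 "name": "Bacterial Disease",
--                 "probability": "Medium",
--                 "description": "Bacterial infection causing plant deterioration"
--             }
--         ]
--
--     return diseases[:4]  # Return max 4 diseases
-- ===== SOURCE B (Python) =====
-- def extract_diseases_from_analysis(analysis: str) -> list:
--     """Extract structured disease information from analysis text (two-pass: segment into blocks, then map blocks to records)"""
--     keywords = ['disease', 'infection', 'deficiency', 'virus', 'bacteria', 'fungal']
--
--     def is_header(t):
--         return bool(t) and '*' in t and any(w in t.lower() for w in keywords)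
--
--     # pass 1: segment stripped lines into blocks (header, body); lines before the first header are dropped
--     blocks = []
--     for raw in analysis.split('\n'):
--         t = raw.strip()
--         if is_header(t):
--             blocks.append((t, []))
--         elif blocks:
--             blocks[-1][1].append(t)
--
--     # pass 2: map each block to a record
--     diseases = []
--     for header, body in blocks:
--         name = header.replace('*', '').replace('-', '').strip()
--         prob = "Medium"
--         desc = ""
--         for t in body:
--             if t and not t.startswith('**'):
--                 low = t.lower()
--                 if 'probability:' in low or 'high' in low or 'medium' in low or 'low' in low:
--                     prob = "High" if 'high' in low else ("Low" if 'low' in low else "Medium")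
--                 else:
--                     desc += t + " "
--         diseases.append({"name": name, "probability": prob, "description": desc})
--
--     if not diseases:
--         diseases = [
--             {"name": "Fungal Infection", "probability": "High",
--              "description": "Common crop disease affecting leaves and stems"},
--             {"name": "Bacterial Disease", "probability": "Medium",
--              "description": "Bacterial infection causing plant deterioration"},
--         ]
--     return diseases[:4]
-- ===== Notes on version B (the rewrite author's own statement) =====
-- stated objective: alternative
-- what changed: A's single pass with a mutable current-disease dict is replaced by a two-pass decomposition: first segment the stripped lines into (header, body) blocks, then map each block to a record by folding its body over a plain (probability, description) string pair; no dict is mutated incrementally.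
import Mathlib
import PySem

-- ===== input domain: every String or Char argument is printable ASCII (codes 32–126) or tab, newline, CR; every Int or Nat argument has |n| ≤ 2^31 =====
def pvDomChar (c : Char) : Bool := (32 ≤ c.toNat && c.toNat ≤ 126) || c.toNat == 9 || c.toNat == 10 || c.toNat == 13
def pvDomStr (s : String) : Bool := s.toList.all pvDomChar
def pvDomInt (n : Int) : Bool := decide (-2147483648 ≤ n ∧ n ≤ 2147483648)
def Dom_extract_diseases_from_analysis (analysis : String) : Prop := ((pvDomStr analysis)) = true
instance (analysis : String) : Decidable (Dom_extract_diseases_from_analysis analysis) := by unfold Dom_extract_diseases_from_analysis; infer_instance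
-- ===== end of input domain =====

-- B re-implements the single-pass parser as two passes (segment the lines into header/body blocks, then map each
-- block to a record of plain string triples instead of incremental dict mutation); objective: alternative decomposition, same cost.

-- ===== PORT A =====
def pvKwA : List String := ["disease", "infection", "deficiency", "virus", "bacteria", "fungal"]

-- one iteration of A's single loop: state = (diseases so far, current_disease)
def pvStepA (st : List (PySem.Dict String String) × Option (PySem.Dict String String)) (l0 : String) :
    List (PySem.Dict String String) × Option (PySem.Dict String String) :=
  let line := PySem.Str.strip l0
  if !(line == "") && (PySem.Str.isIn "**" line || PySem.Str.isIn "*" line) &&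
      pvKwA.any (fun w => PySem.Str.isIn w (PySem.Str.lower line)) then
    (st.1 ++ st.2.toList,
     some ((((PySem.Dict.empty).insert "name"
        (PySem.Str.strip (PySem.Str.replace (PySem.Str.replace line "*" "") "-" ""))).insert
        "probability" "Medium").insert "description" ""))
  else
    match st.2 with
    | some cur =>
        if !(line == "") && !(PySem.Str.startswith line "**") then
          if PySem.Str.isIn "probability:" (PySem.Str.lower line) || PySem.Str.isIn "high" (PySem.Str.lower line) ||
              PySem.Str.isIn "medium" (PySem.Str.lower line) || PySem.Str.isIn "low" (PySem.Str.lower line) then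
            if PySem.Str.isIn "high" (PySem.Str.lower line) then (st.1, some (cur.insert "probability" "High"))
            else if PySem.Str.isIn "low" (PySem.Str.lower line) then (st.1, some (cur.insert "probability" "Low"))
            else (st.1, some (cur.insert "probability" "Medium"))
          else (st.1, some (cur.insert "description" (cur.getD "description" "" ++ (line ++ " "))))
        else st
    | none => st

def extract_diseases_from_analysis (analysis : String) : List (List (String × String)) :=
  let lines := (PySem.Str.split? analysis "\n").getD []
  let res := lines.foldl pvStepA ([], none)
  let diseases := res.1 ++ res.2.toList
  let diseases := if diseases = [] then
      [PySem.Dict.ofList [("name", "Fungal Infection"), ("probability", "High"),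
         ("description", "Common crop disease affecting leaves and stems")],
       PySem.Dict.ofList [("name", "Bacterial Disease"), ("probability", "Medium"),
         ("description", "Bacterial infection causing plant deterioration")]]
    else diseases
  (PySem.List.slice diseases none (some 4)).map (fun d => d.items)

-- ===== PORT B =====
-- B uses the same keyword list constant pvKwA
def pvIsHeader (t : String) : Bool :=
  !(t == "") && PySem.Str.isIn "*" t && pvKwA.any (fun w => PySem.Str.isIn w (PySem.Str.lower t))

-- blocks[-1][1].append(t)
def pvAppendLast : List (String × List String) → String → List (String × List String)
  | [], _ => []
  | [(h, body)], t => [(h, body ++ [t])]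
  | b :: c :: rest, t => b :: pvAppendLast (c :: rest) t

-- pass 1: segment the stripped lines into (header, body) blocks
def pvAddLine (bs : List (String × List String)) (raw : String) : List (String × List String) :=
  let t := PySem.Str.strip raw
  if pvIsHeader t then bs ++ [(t, [])]
  else match bs with
    | [] => []
    | _ :: _ => pvAppendLast bs t

-- pass 2 inner fold over a block body: state = (prob, desc)
def pvFoldRec (st : String × String) (t : String) : String × String :=
  if !(t == "") && !(PySem.Str.startswith t "**") then
    if PySem.Str.isIn "probability:" (PySem.Str.lower t) || PySem.Str.isIn "high" (PySem.Str.lower t) ||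
        PySem.Str.isIn "medium" (PySem.Str.lower t) || PySem.Str.isIn "low" (PySem.Str.lower t) then
      ((if PySem.Str.isIn "high" (PySem.Str.lower t) then "High"
        else if PySem.Str.isIn "low" (PySem.Str.lower t) then "Low" else "Medium"), st.2)
    else (st.1, st.2 ++ (t ++ " "))
  else st

def pvRecord (b : String × List String) : List (String × String) :=
  let name := PySem.Str.strip (PySem.Str.replace (PySem.Str.replace b.1 "*" "") "-" "")
  let pd := b.2.foldl pvFoldRec ("Medium", "")
  [("name", name), ("probability", pd.1), ("description", pd.2)]

def extract_diseases_from_analysis_alt (analysis : String) : List (List (String × String)) :=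
  let blocks := ((PySem.Str.split? analysis "\n").getD []).foldl pvAddLine []
  let diseases := blocks.map pvRecord
  let diseases := if diseases = [] then
      [[("name", "Fungal Infection"), ("probability", "High"),
        ("description", "Common crop disease affecting leaves and stems")],
       [("name", "Bacterial Disease"), ("probability", "Medium"),
        ("description", "Bacterial infection causing plant deterioration")]]
    else diseases
  diseases.take 4

-- ===== PRECONDITION & SPEC =====
def Spec_extract_diseases_from_analysis (analysis : String) (out : List (List (String × String))) : Prop := out = extract_diseases_from_analysis_alt analysis
instance (analysis : String) (out : List (List (String × String))) : Decidable (Spec_extract_diseases_from_analysis analysis out) := by unfold Spec_extract_diseases_from_analysis; infer_instance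

-- ===== CLAIM (what is proved, stated in full; the proofs are below) =====
def Claim_equal_extract_diseases_from_analysis : Prop := ∀ (analysis : String), Dom_extract_diseases_from_analysis analysis → Spec_extract_diseases_from_analysis analysis (extract_diseases_from_analysis analysis)

-- ===== LEMMAS AND PROOFS =====

-- is_header on the raw (unstripped) line
def pvHdr (l : String) : Bool := pvIsHeader (PySem.Str.strip l)

-- proof-side segmentation of the line list into blocks
def pvSegB : List String → List (String × List String)
  | [] => []
  | l :: ls =>
    if pvHdr l then
      (PySem.Str.strip l, (ls.takeWhile (fun x => !pvHdr x)).map PySem.Str.strip)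
        :: pvSegB (ls.dropWhile (fun x => !pvHdr x))
    else pvSegB ls
termination_by ls => ls.length
decreasing_by
  · have := (List.dropWhile_sublist (l := ls) (p := fun x => !pvHdr x)).length_le
    simp; omega
  · simp

-- A's new-record dict and A's body-line update, on an already-stripped line
def pvMkRec (t : String) : PySem.Dict String String :=
  (((PySem.Dict.empty).insert "name"
      (PySem.Str.strip (PySem.Str.replace (PySem.Str.replace t "*" "") "-" ""))).insert
      "probability" "Medium").insert "description" ""

def pvUpdT (r : PySem.Dict String String) (t : String) : PySem.Dict String String :=
  if !(t == "") && !(PySem.Str.startswith t "**") then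
    if PySem.Str.isIn "probability:" (PySem.Str.lower t) || PySem.Str.isIn "high" (PySem.Str.lower t) ||
        PySem.Str.isIn "medium" (PySem.Str.lower t) || PySem.Str.isIn "low" (PySem.Str.lower t) then
      if PySem.Str.isIn "high" (PySem.Str.lower t) then r.insert "probability" "High"
      else if PySem.Str.isIn "low" (PySem.Str.lower t) then r.insert "probability" "Low"
      else r.insert "probability" "Medium"
    else r.insert "description" (r.getD "description" "" ++ (t ++ " "))
  else r

def pvProcD (b : String × List String) : PySem.Dict String String :=
  b.2.foldl pvUpdT (pvMkRec b.1)

def pvDict3 (n p d : String) : PySem.Dict String String :=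
  PySem.Dict.mk [("name", n), ("probability", p), ("description", d)]

-- A's header condition is B's is_header ('**' in line implies '*' in line)
theorem pvHeaderCond (line : String) :
    (!(line == "") && (PySem.Str.isIn "**" line || PySem.Str.isIn "*" line) &&
      pvKwA.any (fun w => PySem.Str.isIn w (PySem.Str.lower line))) = pvIsHeader line := by
  unfold pvIsHeader pvKwA
  by_cases h : PySem.Str.isIn "*" line = true
  · rw [h, Bool.or_true]
  · have h2 : PySem.Str.isIn "**" line = false := by
      rw [Bool.eq_false_iff]
      intro hc
      exact h ((PySem.Str.isIn_iff_infix _ _).mpr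
        (List.IsInfix.trans (by decide : "*".toList <:+: "**".toList)
          ((PySem.Str.isIn_iff_infix _ _).mp hc)))
    simp only [Bool.not_eq_true] at h
    rw [h, h2, Bool.or_false]

theorem pvStepA_some (ds : List (PySem.Dict String String)) (r : PySem.Dict String String) (l : String) :
    pvStepA (ds, some r) l =
      if pvHdr l then (ds ++ [r], some (pvMkRec (PySem.Str.strip l)))
      else (ds, some (pvUpdT r (PySem.Str.strip l))) := by
  unfold pvStepA pvUpdT pvMkRec pvHdr
  simp only [pvHeaderCond]
  by_cases hb : pvIsHeader (PySem.Str.strip l) = true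
  · simp [hb]
  · simp only [Bool.not_eq_true] at hb
    simp only [hb, Bool.false_eq_true, if_false]
    split_ifs <;> rfl

theorem pvStepA_none (ds : List (PySem.Dict String String)) (l : String) :
    pvStepA (ds, none) l =
      if pvHdr l then (ds, some (pvMkRec (PySem.Str.strip l))) else (ds, none) := by
  unfold pvStepA pvMkRec pvHdr
  simp only [pvHeaderCond]
  by_cases hb : pvIsHeader (PySem.Str.strip l) = true
  · simp [hb]
  · simp only [Bool.not_eq_true] at hb
    simp [hb]

theorem pvA_some (ls : List String) : ∀ (ds : List (PySem.Dict String String)) (r : PySem.Dict String String),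
    (ls.foldl pvStepA (ds, some r)).1 ++ (ls.foldl pvStepA (ds, some r)).2.toList =
      ds ++ ((ls.takeWhile (fun x => !pvHdr x)).foldl (fun a l => pvUpdT a (PySem.Str.strip l)) r)
        :: (pvSegB (ls.dropWhile (fun x => !pvHdr x))).map pvProcD := by
  induction ls with
  | nil => intro ds r; simp [pvSegB]
  | cons l rest ih =>
    intro ds r
    rw [List.foldl_cons, pvStepA_some]
    by_cases hb : pvHdr l = true
    · have hp : (fun x => !pvHdr x) l = false := by simp [hb]
      simp only [hb, if_true]
      rw [ih]
      simp [pvSegB, hb, pvProcD, List.foldl_map]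
    · have hp : (fun x => !pvHdr x) l = true := by simp [Bool.not_eq_true] at hb ⊢; exact hb
      rw [if_neg (by simp [hb])]
      rw [ih]
      simp [hp]

theorem pvA_none (ls : List String) : ∀ (ds : List (PySem.Dict String String)),
    (ls.foldl pvStepA (ds, none)).1 ++ (ls.foldl pvStepA (ds, none)).2.toList =
      ds ++ (pvSegB ls).map pvProcD := by
  induction ls with
  | nil => intro ds; simp [pvSegB]
  | cons l rest ih =>
    intro ds
    rw [List.foldl_cons, pvStepA_none]
    by_cases hb : pvHdr l = true
    · have hp : (fun x => !pvHdr x) l = false := by simp [hb]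
      simp only [hb, if_true]
      rw [pvA_some]
      simp [pvSegB, hb, pvProcD, List.foldl_map]
    · rw [if_neg (by simp [hb])]
      rw [ih]
      simp [pvSegB, hb]

theorem pvAppendLast_snoc (done : List (String × List String)) (h : String) (body : List String) (t : String) :
    pvAppendLast (done ++ [(h, body)]) t = done ++ [(h, body ++ [t])] := by
  induction done with
  | nil => rfl
  | cons b rest ih =>
    cases rest with
    | nil => rfl
    | cons c rest2 =>
      simp only [List.cons_append, pvAppendLast]
      exact congrArg _ ih

theorem pvB_blocks (ls : List String) : ∀ (done : List (String × List String)) (h : String) (body : List String),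
    ls.foldl pvAddLine (done ++ [(h, body)]) =
      done ++ (h, body ++ (ls.takeWhile (fun x => !pvHdr x)).map PySem.Str.strip)
        :: pvSegB (ls.dropWhile (fun x => !pvHdr x)) := by
  induction ls with
  | nil => intro done h body; simp [pvSegB]
  | cons l rest ih =>
    intro done h body
    rw [List.foldl_cons]
    by_cases hb : pvHdr l = true
    · have hp : (fun x => !pvHdr x) l = false := by simp [hb]
      have step : pvAddLine (done ++ [(h, body)]) l = (done ++ [(h, body)]) ++ [(PySem.Str.strip l, [])] := by
        unfold pvAddLine pvHdr at *
        simp [hb]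
      rw [step, ih]
      simp [pvSegB, hb]
    · have hp : (fun x => !pvHdr x) l = true := by simp [Bool.not_eq_true] at hb ⊢; exact hb
      have step : pvAddLine (done ++ [(h, body)]) l = done ++ [(h, body ++ [PySem.Str.strip l])] := by
        unfold pvAddLine pvHdr at *
        simp only [Bool.not_eq_true] at hb
        cases done with
        | nil => simp [hb, pvAppendLast]
        | cons b rest2 =>
          simp only [hb, Bool.false_eq_true, if_false]
          exact pvAppendLast_snoc (b :: rest2) h body _
      rw [step, ih]
      simp [hp]

theorem pvB_none (ls : List String) : ls.foldl pvAddLine [] = pvSegB ls := by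
  induction ls with
  | nil => simp [pvSegB]
  | cons l rest ih =>
    rw [List.foldl_cons]
    by_cases hb : pvHdr l = true
    · have step : pvAddLine [] l = [] ++ [(PySem.Str.strip l, [])] := by
        unfold pvAddLine pvHdr at *
        simp [hb]
      rw [step, pvB_blocks]
      simp [pvSegB, hb]
    · have step : pvAddLine [] l = [] := by
        unfold pvAddLine pvHdr at *
        simp only [Bool.not_eq_true] at hb
        simp [hb]
      rw [step, ih]
      simp [pvSegB, hb]

theorem pvInsertProb (n p d v : String) : (pvDict3 n p d).insert "probability" v = pvDict3 n v d := by
  apply PySem.Dict.ext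
  rw [PySem.Dict.items_insert_of_contains]
  · simp [pvDict3]
  · simp [pvDict3]

theorem pvInsertDesc (n p d v : String) : (pvDict3 n p d).insert "description" v = pvDict3 n p v := by
  apply PySem.Dict.ext
  rw [PySem.Dict.items_insert_of_contains]
  · simp [pvDict3]
  · simp [pvDict3]

theorem pvGetDDesc (n p d : String) : (pvDict3 n p d).getD "description" "" = d := by
  simp [pvDict3, PySem.Dict.getD, PySem.Dict.get?]

theorem pvMkRec_eq (t : String) :
    pvMkRec t = pvDict3 (PySem.Str.strip (PySem.Str.replace (PySem.Str.replace t "*" "") "-" "")) "Medium" "" := rfl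

theorem pvStep3 (n p d t : String) :
    pvUpdT (pvDict3 n p d) t = pvDict3 n (pvFoldRec (p, d) t).1 (pvFoldRec (p, d) t).2 := by
  unfold pvUpdT pvFoldRec
  split_ifs <;> simp [pvInsertProb, pvInsertDesc, pvGetDDesc]

theorem pvItems (body : List String) : ∀ (n p d : String),
    (body.foldl pvUpdT (pvDict3 n p d)).items =
      [("name", n), ("probability", (body.foldl pvFoldRec (p, d)).1),
       ("description", (body.foldl pvFoldRec (p, d)).2)] := by
  induction body with
  | nil => intro n p d; rfl
  | cons t rest ih =>
    intro n p d
    rw [List.foldl_cons, List.foldl_cons, pvStep3, ih]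

theorem pvRecord_eq (b : String × List String) : pvRecord b = (pvProcD b).items := by
  unfold pvRecord pvProcD
  rw [pvMkRec_eq, pvItems]

-- ===== VERDICT (by name: the statement is the Claim_ definition above) =====
theorem extract_diseases_from_analysis_spec : Claim_equal_extract_diseases_from_analysis := by
  intro analysis _
  unfold Spec_extract_diseases_from_analysis
  unfold extract_diseases_from_analysis extract_diseases_from_analysis_alt
  have hA := pvA_none ((PySem.Str.split? analysis "\n").getD []) []
  simp only [List.nil_append] at hA
  have hs : ∀ (xs : List (PySem.Dict String String)),
      PySem.List.slice xs none (some 4) = xs.take ((4 : Int)).toNat :=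
    fun xs => by rw [PySem.List.slice_to]; norm_num
  simp only [pvB_none, hA, hs]
  by_cases hL : pvSegB ((PySem.Str.split? analysis "\n").getD []) = []
  · rw [hL]
    rfl
  · have h1 : List.map pvProcD (pvSegB ((PySem.Str.split? analysis "\n").getD [])) ≠ [] := by
      simpa using hL
    have h2 : List.map pvRecord (pvSegB ((PySem.Str.split? analysis "\n").getD [])) ≠ [] := by
      simpa using hL
    have hrec : List.map (fun d : PySem.Dict String String => d.items)
        (List.map pvProcD (pvSegB ((PySem.Str.split? analysis "\n").getD []))) =
        List.map pvRecord (pvSegB ((PySem.Str.split? analysis "\n").getD [])) := by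
      rw [List.map_map]
      exact List.map_congr_left (fun b _ => (pvRecord_eq b).symm)
    simp only [if_neg h1, if_neg h2, List.map_take, hrec]
    rfl
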